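-- pv_equiv track=rewrite | github.com/AlexLaros/lessons_py | lesson_13/package_for_all_occasions/assorted_module.py | there_are_the_same_neighbours
-- ===== SOURCE A (Python) =====
-- def there_are_the_same_neighbours(num: int) -> str:
--     """
--     This function detects the presence of identical neighboring digits
--     in the number
--     :param num: int
--     :return: str
--     """
--     num_str = str(num)
--     neighbor_count = 0
--     for i in range(len(num_str) - 1):
--         if num_str[i] == num_str[i + 1]:
--             neighbor_count += 1
--
--     if neighbor_count >= 1:
--         return "Yes."
--     else:
--         return "No."
-- ===== SOURCE B (Python) =====
-- import re
--
--
-- def there_are_the_same_neighbours(num: int) -> str: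
--     """Detect identical neighbouring digits via a regex backreference."""
--     return "Yes." if re.search(r'(.)\1', str(num)) else "No."
-- ===== Notes on version B (the rewrite author's own statement) =====
-- stated objective: idiomatic
-- what changed: Replaces the explicit index loop with a counter by a single regex search for two consecutive identical characters (backreference (.)\1), short-circuiting at the first match instead of counting all pairs.
import Mathlib
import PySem

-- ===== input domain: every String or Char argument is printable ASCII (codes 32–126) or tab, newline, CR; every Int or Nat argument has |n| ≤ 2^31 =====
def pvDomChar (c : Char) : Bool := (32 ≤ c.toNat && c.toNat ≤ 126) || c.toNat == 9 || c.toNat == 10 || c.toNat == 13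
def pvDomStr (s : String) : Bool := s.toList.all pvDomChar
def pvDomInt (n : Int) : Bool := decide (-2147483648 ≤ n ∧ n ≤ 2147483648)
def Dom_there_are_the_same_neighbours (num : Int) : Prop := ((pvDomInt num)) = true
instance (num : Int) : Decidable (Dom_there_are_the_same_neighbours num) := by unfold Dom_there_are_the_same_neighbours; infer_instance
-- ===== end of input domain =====

-- B replaces A's index loop + pair counter by a single short-circuiting regex search
-- re.search(r'(.)\1', str(num)) (idiomatic); equal return value proved on the whole domain.


-- ===== PORT A =====
def there_are_the_same_neighbours (num : Int) : String :=
  let num_str := (PySem.Int.toStr num).toList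
  let neighbor_count : Int :=
    (PySem.List.pyRange 0 ((num_str.length : Int) - 1) 1).foldl
      (fun acc i =>
        if PySem.List.pyGet? num_str i = PySem.List.pyGet? num_str (i + 1) then acc + 1 else acc)
      0
  if neighbor_count ≥ 1 then "Yes." else "No."

-- ===== PORT B =====
-- Exact port of re.search(r'(.)\1', s) for this fixed pattern: the engine tries the pattern at
-- each start position in turn; at a position it matches iff two characters remain there and
-- the second equals the first (the backreference), stopping at the first match.
def reSearchAdj : List Char → Bool
  | [] => false
  | [_] => false
  | a :: b :: rest => if a == b then true else reSearchAdj (b :: rest)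

def there_are_the_same_neighbours_alt (num : Int) : String :=
  if reSearchAdj (PySem.Int.toStr num).toList then "Yes." else "No."

-- ===== PRECONDITION & SPEC =====
def Spec_there_are_the_same_neighbours (num : Int) (out : String) : Prop := out = there_are_the_same_neighbours_alt num
instance (num : Int) (out : String) : Decidable (Spec_there_are_the_same_neighbours num out) := by unfold Spec_there_are_the_same_neighbours; infer_instance

-- ===== CLAIM (what is proved, stated in full; the proofs are below) =====
def Claim_equal_there_are_the_same_neighbours : Prop := ∀ (num : Int), Dom_there_are_the_same_neighbours num → Spec_there_are_the_same_neighbours num (there_are_the_same_neighbours num)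

-- ===== LEMMAS AND PROOFS =====

-- B's search succeeds iff some adjacent pair of positions holds equal characters.
theorem reSearchAdj_iff (l : List Char) :
    reSearchAdj l = true ↔ ∃ k : Nat, k + 1 < l.length ∧ l[k]? = l[k + 1]? := by
  induction l with
  | nil => simp [reSearchAdj]
  | cons a t ih =>
    cases t with
    | nil =>
      simp [reSearchAdj]
    | cons b rest =>
      constructor
      · intro h
        by_cases hab : a = b
        · exact ⟨0, by simp, by simp [hab]⟩
        · simp only [reSearchAdj, beq_iff_eq, if_neg hab] at h
          obtain ⟨k, hk, he⟩ := ih.mp h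
          exact ⟨k + 1, by simpa using hk, by simpa using he⟩
      · rintro ⟨k, hk, he⟩
        cases k with
        | zero =>
          simp at he
          simp [reSearchAdj, he]
        | succ j =>
          by_cases hab : a = b
          · simp [reSearchAdj, hab]
          · simp only [reSearchAdj, beq_iff_eq, if_neg hab]
            exact ih.mpr ⟨j, by simpa using hk, by simpa using he⟩

-- A's counter is at least one iff some adjacent pair of positions holds equal characters.
theorem countA_iff (l : List Char) :
    ((PySem.List.pyRange 0 ((l.length : Int) - 1) 1).foldl
      (fun acc i =>
        if PySem.List.pyGet? l i = PySem.List.pyGet? l (i + 1) then acc + 1 else acc)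
      (0 : Int)) ≥ 1 ↔ ∃ k : Nat, k + 1 < l.length ∧ l[k]? = l[k + 1]? := by
  rw [PySem.List.foldl_ite_add_one]
  have hcast : ∀ n : Nat, ((0 : Int) + (n : Int) ≥ 1 ↔ 0 < n) := fun n => by omega
  rw [hcast, List.countP_pos_iff]
  constructor
  · rintro ⟨i, hi, hp⟩
    rw [PySem.List.mem_pyRange_one] at hi
    obtain ⟨h0, h1⟩ := hi
    refine ⟨i.toNat, by omega, ?_⟩
    simp only [decide_eq_true_eq] at hp
    rw [show i = ((i.toNat : Nat) : Int) by omega,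
        show ((i.toNat : Nat) : Int) + 1 = ((i.toNat + 1 : Nat) : Int) by omega] at hp
    simp only [PySem.List.pyGet?_natCast] at hp
    exact hp
  · rintro ⟨k, hk, he⟩
    refine ⟨(k : Int), ?_, ?_⟩
    · rw [PySem.List.mem_pyRange_one]; omega
    · simp only [decide_eq_true_eq]
      rw [PySem.List.pyGet?_natCast, show (k : Int) + 1 = ((k + 1 : Nat) : Int) by omega,
          PySem.List.pyGet?_natCast]
      exact he

-- ===== VERDICT (by name: the statement is the Claim_ definition above) =====
theorem there_are_the_same_neighbours_spec : Claim_equal_there_are_the_same_neighbours := by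
  intro num _
  unfold Spec_there_are_the_same_neighbours there_are_the_same_neighbours there_are_the_same_neighbours_alt
  simp only
  by_cases h : ∃ k : Nat, k + 1 < (PySem.Int.toStr num).toList.length ∧
      (PySem.Int.toStr num).toList[k]? = (PySem.Int.toStr num).toList[k + 1]?
  · rw [if_pos ((countA_iff _).mpr h), if_pos ((reSearchAdj_iff _).mpr h)]
  · rw [if_neg (fun hc => h ((countA_iff _).mp hc)),
        if_neg (fun hc => h ((reSearchAdj_iff _).mp hc))]
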